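-- pv_equiv track=rewrite | github.com/prajalpatidar0406/Codeforces | problems/1914C_Quests.py | dfs
-- ===== SOURCE A (Python) =====
-- def dfs(arr, brr, idx, max_brr, k, ans):
--     if k <= 0:
--         return ans
--     a = 0
--     if idx < len(arr):
--         a = dfs(arr, brr, idx+1, max(max_brr, brr[idx]), k-1, ans + arr[idx])
--     b = ans + (k*max_brr)
--     return max(a, b)
-- ===== SOURCE B (Python) =====
-- def dfs(arr, brr, idx, max_brr, k, ans):
--     if k <= 0:
--         return ans
--     best = ans + k * max_brr
--     cur_ans, cur_max, cur_k, i = ans, max_brr, k, idx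
--     terminal = 0
--     while i < len(arr):
--         cur_ans += arr[i]
--         cur_max = max(cur_max, brr[i])
--         cur_k -= 1
--         i += 1
--         if cur_k <= 0:
--             terminal = cur_ans
--             break
--         best = max(best, cur_ans + cur_k * cur_max)
--     return max(best, terminal)
-- ===== Notes on version B (the rewrite author's own statement) =====
-- stated objective: alternative
-- what changed: Replaces A's recursion (one stack frame per step, result folded through nested max calls) with a single iterative loop that maintains running sum/max/budget and a running best candidate plus an explicit terminal value.
import Mathlib
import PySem

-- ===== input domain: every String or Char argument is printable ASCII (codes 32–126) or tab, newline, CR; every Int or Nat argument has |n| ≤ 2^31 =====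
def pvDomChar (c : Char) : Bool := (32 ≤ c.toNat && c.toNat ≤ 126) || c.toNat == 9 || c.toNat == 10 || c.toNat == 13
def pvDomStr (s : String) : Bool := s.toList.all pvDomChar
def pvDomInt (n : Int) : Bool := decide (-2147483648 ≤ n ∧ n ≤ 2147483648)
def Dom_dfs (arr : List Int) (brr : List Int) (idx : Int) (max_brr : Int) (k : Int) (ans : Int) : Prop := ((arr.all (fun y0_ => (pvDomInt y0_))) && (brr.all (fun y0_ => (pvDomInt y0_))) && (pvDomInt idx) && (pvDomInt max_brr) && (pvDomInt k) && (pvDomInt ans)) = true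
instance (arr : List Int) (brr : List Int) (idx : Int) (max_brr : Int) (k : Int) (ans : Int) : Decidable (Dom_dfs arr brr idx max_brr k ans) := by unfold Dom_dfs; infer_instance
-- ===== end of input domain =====

-- B replaces A's recursion with an iterative O(1)-space loop over candidates; equal return values on Pre_.

-- ===== PORT A =====
-- literal port of A's recursion; pyGet? models Python indexing (negative wraparound), the
-- .getD 0 fallback is only reached outside Pre_dfs (where the Python raises IndexError)
def dfs (arr : List Int) (brr : List Int) (idx : Int) (max_brr : Int) (k : Int) (ans : Int) : Int :=
  if k ≤ 0 then ans
  else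
    let a : Int :=
      if _h : idx < (arr.length : Int) then
        dfs arr brr (idx + 1) (max max_brr ((PySem.List.pyGet? brr idx).getD 0)) (k - 1)
          (ans + (PySem.List.pyGet? arr idx).getD 0)
      else 0
    max a (ans + k * max_brr)
termination_by ((arr.length : Int) - idx).toNat
decreasing_by omega

-- ===== PORT B =====
-- the while-loop of Source B: returns (best, terminal)
def dfsLoop (arr : List Int) (brr : List Int) (i cur_ans cur_max cur_k best : Int) : Int × Int :=
  if _h : i < (arr.length : Int) then
    let cur_ans' := cur_ans + (PySem.List.pyGet? arr i).getD 0
    let cur_max' := max cur_max ((PySem.List.pyGet? brr i).getD 0)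
    let cur_k' := cur_k - 1
    if cur_k' ≤ 0 then (best, cur_ans')
    else dfsLoop arr brr (i + 1) cur_ans' cur_max' cur_k' (max best (cur_ans' + cur_k' * cur_max'))
  else (best, 0)
termination_by ((arr.length : Int) - i).toNat
decreasing_by omega

def dfs_alt (arr : List Int) (brr : List Int) (idx : Int) (max_brr : Int) (k : Int) (ans : Int) : Int :=
  if k ≤ 0 then ans
  else
    let p := dfsLoop arr brr idx ans max_brr k (ans + k * max_brr)
    max p.1 p.2

-- ===== PRECONDITION & SPEC =====
-- Pre_ excludes exactly the inputs on which the Python A raises IndexError (an index that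
-- the recursion visits falls outside arr's negative range or outside brr's range).
def Pre_dfs (arr : List Int) (brr : List Int) (idx : Int) (max_brr : Int) (k : Int) (ans : Int) : Prop :=
  k ≤ 0 ∨ (arr.length : Int) ≤ idx ∨
    (-(arr.length : Int) ≤ idx ∧ -(brr.length : Int) ≤ idx ∧
      min ((arr.length : Int) - 1) (idx + k - 1) < (brr.length : Int))
instance (arr : List Int) (brr : List Int) (idx : Int) (max_brr : Int) (k : Int) (ans : Int) : Decidable (Pre_dfs arr brr idx max_brr k ans) := by unfold Pre_dfs; infer_instance

def pvWitness_dfs : List Int × List Int × Int × Int × Int × Int := ([1, -2, 3], [2, 5, 1], 0, 0, 2, 0)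

def Spec_dfs (arr : List Int) (brr : List Int) (idx : Int) (max_brr : Int) (k : Int) (ans : Int) (out : Int) : Prop := out = dfs_alt arr brr idx max_brr k ans
instance (arr : List Int) (brr : List Int) (idx : Int) (max_brr : Int) (k : Int) (ans : Int) (out : Int) : Decidable (Spec_dfs arr brr idx max_brr k ans out) := by unfold Spec_dfs; infer_instance

-- ===== CLAIM (what is proved, stated in full; the proofs are below) =====
def Claim_equal_dfs : Prop := ∀ (arr : List Int) (brr : List Int) (idx : Int) (max_brr : Int) (k : Int) (ans : Int), Dom_dfs arr brr idx max_brr k ans → Pre_dfs arr brr idx max_brr k ans → Spec_dfs arr brr idx max_brr k ans (dfs arr brr idx max_brr k ans)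

-- ===== LEMMAS AND PROOFS =====
lemma max_rot (x y z : Int) : max (max x y) z = max x (max z y) := by
  rw [max_assoc, max_comm y z]

lemma loop_eq (arr brr : List Int) :
    ∀ (n : Nat) (i a m k best : Int), ((arr.length : Int) - i).toNat = n → 1 ≤ k →
      max (dfsLoop arr brr i a m k best).1 (dfsLoop arr brr i a m k best).2 =
        max best
          (if i < (arr.length : Int) then
            dfs arr brr (i + 1) (max m ((PySem.List.pyGet? brr i).getD 0)) (k - 1)
              (a + (PySem.List.pyGet? arr i).getD 0)
          else 0) := by
  intro n
  induction n using Nat.strong_induction_on with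
  | _ n ih =>
    intro i a m k best hn hk
    rw [dfsLoop]
    by_cases hi : i < (arr.length : Int)
    · simp only [hi, dif_pos, if_pos]
      by_cases hk1 : k - 1 ≤ 0
      · rw [if_pos hk1, dfs]
        simp [hk1]
      · rw [if_neg hk1]
        rw [ih (((arr.length : Int) - (i + 1)).toNat) (by omega) (i + 1) _ _ (k - 1) _ rfl
          (by omega)]
        conv_rhs => rw [dfs]
        rw [if_neg hk1]
        exact max_rot _ _ _
    · simp [hi]

theorem dfs_spec : Claim_equal_dfs := by
  intro arr brr idx max_brr k ans _hdom _hpre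
  unfold Spec_dfs dfs_alt
  by_cases hk : k ≤ 0
  · rw [dfs, if_pos hk, if_pos hk]
  · rw [if_neg hk]
    rw [loop_eq arr brr (((arr.length : Int) - idx).toNat) idx ans max_brr k _ rfl (by omega)]
    conv_lhs => rw [dfs]
    rw [if_neg hk]
    by_cases hi : idx < (arr.length : Int)
    · simp only [hi, dif_pos, if_pos]
      exact max_comm _ _
    · simp only [hi, dif_neg, not_false_iff, if_neg]
      exact max_comm _ _
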